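-- pv_equiv track=rewrite | github.com/nermadie/CodeForces_Solutions | Utils/BinarySearch.py | bs_first_exact_asc
-- ===== SOURCE A (Python) =====
-- def _init_lr(arr, l, r):
--     if l is None:
--         l = 0
--     if r is None:
--         r = len(arr) - 1
--     return l, r
--
-- def bs_first_exact_asc(arr, x, l=None, r=None):
--     l, r = _init_lr(arr, l, r)
--     res = -1
--     while l <= r:
--         m = (l + r) // 2
--         if arr[m] == x:
--             res = m
--             r = m - 1  # tìm FIRST
--         elif arr[m] < x:
--             l = m + 1
--         else:
--             r = m - 1
--     return res
-- ===== SOURCE B (Python) =====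
-- def bs_first_exact_asc(arr, x, l=None, r=None):
--     # Recursive decomposition: search left half first on a >= probe and
--     # combine results, using None (not a sentinel index) for "not found".
--     def go(lo, hi):
--         if lo > hi:
--             return None
--         m = (lo + hi) // 2
--         if arr[m] < x:
--             return go(m + 1, hi)
--         t = go(lo, m - 1)
--         if t is not None:
--             return t
--         return m if arr[m] == x else None
--
--     lo = 0 if l is None else l
--     hi = len(arr) - 1 if r is None else r
--     res = go(lo, hi)
--     return -1 if res is None else res
-- ===== Notes on version B (the rewrite author's own statement) =====
-- stated objective: alternative
-- what changed: The iterative three-way loop with a 'res' accumulator is replaced by a recursive search that recurses left on every >= probe and combines the answers, with None instead of the -1 sentinel for 'not found'.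
-- outside the precondition, e.g. on bs_first_exact_asc([0, 5], 0, 0, 2): A returns 0, B returns 0
import Mathlib
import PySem

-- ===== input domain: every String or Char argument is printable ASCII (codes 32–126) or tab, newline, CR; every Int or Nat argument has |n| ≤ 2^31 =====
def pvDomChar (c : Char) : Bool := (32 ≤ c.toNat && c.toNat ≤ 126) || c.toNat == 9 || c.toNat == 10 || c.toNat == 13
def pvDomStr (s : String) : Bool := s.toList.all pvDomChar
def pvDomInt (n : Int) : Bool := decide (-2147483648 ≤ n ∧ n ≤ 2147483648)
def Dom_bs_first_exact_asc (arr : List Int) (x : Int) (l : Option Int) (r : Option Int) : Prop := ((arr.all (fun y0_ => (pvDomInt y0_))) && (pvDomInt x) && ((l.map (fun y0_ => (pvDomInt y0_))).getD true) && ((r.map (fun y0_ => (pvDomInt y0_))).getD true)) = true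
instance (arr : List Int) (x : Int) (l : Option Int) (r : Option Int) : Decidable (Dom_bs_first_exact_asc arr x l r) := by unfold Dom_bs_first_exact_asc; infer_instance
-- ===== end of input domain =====

-- B replaces A's iterative three-way loop carrying a 'res' sentinel by a recursive
-- left-first search combining Option results; same asymptotics ("alternative" objective).


-- ===== PORT A =====
-- helper _init_lr
def pyInitLR (arr : List Int) (l : Option Int) (r : Option Int) : Int × Int :=
  (l.getD 0, r.getD ((arr.length : Int) - 1))

-- the while-loop of A; on an out-of-range probe Python raises IndexError
-- (pyGet? = none): those inputs are outside Pre_, the port returns res there.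
def bsA_loop (arr : List Int) (x : Int) (l : Int) (r : Int) (res : Int) : Int :=
  if l ≤ r then
    let m := PySem.Int.floordiv (l + r) 2
    match PySem.List.pyGet? arr m with
    | none => res
    | some v =>
      if v == x then bsA_loop arr x l (m - 1) m
      else if v < x then bsA_loop arr x (m + 1) r res
      else bsA_loop arr x l (m - 1) res
  else res
termination_by (r + 1 - l).toNat
decreasing_by
  all_goals
    have := PySem.Int.floordiv_two_mid_bounds (lo := l) (hi := r) (by omega)
    omega

def bs_first_exact_asc (arr : List Int) (x : Int) (l : Option Int) (r : Option Int) : Int :=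
  let lr := pyInitLR arr l r
  bsA_loop arr x lr.1 lr.2 (-1)

-- ===== PORT B =====
-- the recursive 'go' of B; none = Python's None (and, on an out-of-range probe,
-- the place where Python would raise — outside Pre_).
def bsB_go (arr : List Int) (x : Int) (lo : Int) (hi : Int) : Option Int :=
  if lo > hi then none
  else
    let m := PySem.Int.floordiv (lo + hi) 2
    match PySem.List.pyGet? arr m with
    | none => none
    | some v =>
      if v < x then bsB_go arr x (m + 1) hi
      else
        match bsB_go arr x lo (m - 1) with
        | some t => some t
        | none => if v == x then some m else none
termination_by (hi + 1 - lo).toNat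
decreasing_by
  all_goals
    have := PySem.Int.floordiv_two_mid_bounds (lo := lo) (hi := hi) (by omega)
    omega

def bs_first_exact_asc_alt (arr : List Int) (x : Int) (l : Option Int) (r : Option Int) : Int :=
  let lo := match l with | none => (0 : Int) | some v => v
  let hi := match r with | none => (arr.length : Int) - 1 | some v => v
  match bsB_go arr x lo hi with
  | none => -1
  | some v => v

-- ===== PRECONDITION & SPEC =====
-- Pre_ excludes explicit bounds whose non-empty interval reaches outside [-len(arr), len(arr)-1]:
-- there Python A may raise IndexError on a probe (on some such inputs the data steers every probe
-- back in range and A still returns a value — see the cite in claim.json; B returns the same value there).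
def Pre_bs_first_exact_asc (arr : List Int) (x : Int) (l : Option Int) (r : Option Int) : Prop :=
  let l0 := l.getD 0
  let r0 := r.getD ((arr.length : Int) - 1)
  r0 < l0 ∨ (-(arr.length : Int) ≤ l0 ∧ r0 < (arr.length : Int))
instance (arr : List Int) (x : Int) (l : Option Int) (r : Option Int) : Decidable (Pre_bs_first_exact_asc arr x l r) := by unfold Pre_bs_first_exact_asc; infer_instance

def pvWitness_bs_first_exact_asc : List Int × Int × Option Int × Option Int := ([1, 2, 2, 3], 2, none, none)

def Spec_bs_first_exact_asc (arr : List Int) (x : Int) (l : Option Int) (r : Option Int) (out : Int) : Prop := out = bs_first_exact_asc_alt arr x l r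
instance (arr : List Int) (x : Int) (l : Option Int) (r : Option Int) (out : Int) : Decidable (Spec_bs_first_exact_asc arr x l r out) := by unfold Spec_bs_first_exact_asc; infer_instance

-- ===== CLAIM (what is proved, stated in full; the proofs are below) =====
def Claim_equal_bs_first_exact_asc : Prop := ∀ (arr : List Int) (x : Int) (l : Option Int) (r : Option Int), Dom_bs_first_exact_asc arr x l r → Pre_bs_first_exact_asc arr x l r → Spec_bs_first_exact_asc arr x l r (bs_first_exact_asc arr x l r)

-- ===== LEMMAS AND PROOFS =====

-- loop/recursion correspondence: A's accumulator loop equals B's combining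
-- recursion with 'res' filled in for a 'none' outcome.  Holds for every l, r.
theorem bsA_loop_eq_go (arr : List Int) (x : Int) :
    ∀ (n : Nat) (l r res : Int), (r + 1 - l).toNat = n →
      bsA_loop arr x l r res = (bsB_go arr x l r).getD res := by
  intro n
  induction n using Nat.strong_induction_on with
  | _ n ih =>
    intro l r res hn
    rw [bsA_loop.eq_def, bsB_go.eq_def]
    by_cases hlr : l ≤ r
    · rw [if_pos hlr, if_neg (show ¬ l > r by omega)]
      have hmb := PySem.Int.floordiv_two_mid_bounds (lo := l) (hi := r) hlr
      cases hget : PySem.List.pyGet? arr (PySem.Int.floordiv (l + r) 2) with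
      | none => simp only [hget, Option.getD_none]
      | some v =>
        simp only [hget]
        by_cases hvx : v = x
        · simp only [hvx, beq_self_eq_true, if_true, lt_self_iff_false, if_false]
          rw [ih _ (by omega) _ _ _ rfl]
          cases bsB_go arr x l (PySem.Int.floordiv (l + r) 2 - 1) with
          | none => simp
          | some t => simp
        · simp only [show (v == x) = false by simpa using hvx, Bool.false_eq_true, if_false]
          by_cases hvlt : v < x
          · simp only [hvlt, if_true]
            exact ih _ (by omega) _ _ _ rfl
          · simp only [hvlt, if_false]
            rw [ih _ (by omega) _ _ _ rfl]
            cases bsB_go arr x l (PySem.Int.floordiv (l + r) 2 - 1) with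
            | none => simp
            | some t => simp
    · rw [if_neg hlr, if_pos (show l > r by omega)]
      simp only [Option.getD_none]

-- ===== VERDICT (by name: the statement is the Claim_ definition above) =====
theorem bs_first_exact_asc_spec : Claim_equal_bs_first_exact_asc := by
  intro arr x l r _ _
  unfold Spec_bs_first_exact_asc bs_first_exact_asc bs_first_exact_asc_alt pyInitLR
  have h := bsA_loop_eq_go arr x _ (l.getD 0) (r.getD ((arr.length : Int) - 1)) (-1) rfl
  cases l <;> cases r <;>
    simp only [Option.getD] at h ⊢ <;>
    rw [h] <;> cases bsB_go arr x _ _ <;> rfl
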